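-- pv_equiv track=rewrite | github.com/icoding2016/study | PY/free_exercise/longest_password.py | solutions
-- ===== SOURCE A (Python) =====
-- def solutions(S):
--     words = S.split(" ")
--     wl = {}    # {words:len}
--     longest = -1
--     for ws in words:
--         b, l = checkPass(ws)
--         if not b:
--             continue
--         else:
--             longest = max(longest, l)
--     return longest
--
-- def checkPass(ws:str)->(bool,int):
--     lc = 0
--     dc = 0
--     for x in ws:
--         if 'a'<=x<='z' or 'A'<=x<='Z':
--             lc += 1
--         elif '0'<=x<='9':
--             dc += 1
--         else:
--             return False, 0
--     if lc%2 != 0 or dc%2 != 1: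
--         return False, lc+dc
--     return True, lc+dc
-- ===== SOURCE B (Python) =====
-- # B: instead of scanning all words with a per-char state machine and tracking a running max,
-- # sort the words by length descending and return the length of the FIRST valid one
-- # (valid = all chars ASCII alphanumeric, total length odd, digit count odd; length odd +
-- # digits odd is equivalent to A's "letters even and digits odd" since length = letters+digits).
-- def _valid(w):
--     return all('a' <= c <= 'z' or 'A' <= c <= 'Z' or '0' <= c <= '9' for c in w)
--
-- def solutions(S):
--     for w in sorted(S.split(' '), key=len, reverse=True):
--         if len(w) % 2 == 1 and _valid(w) and sum('0' <= c <= '9' for c in w) % 2 == 1: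
--             return len(w)
--     return -1
-- ===== Notes on version B (the rewrite author's own statement) =====
-- stated objective: alternative
-- what changed: A scans every word with a per-character state machine (checkPass accumulating letter/digit counters with early exit) and folds a running max; B sorts the words by length descending and returns the length of the first valid word, testing length-parity plus digit-count-parity instead of letter-count-parity plus digit-count-parity.
import Mathlib
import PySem

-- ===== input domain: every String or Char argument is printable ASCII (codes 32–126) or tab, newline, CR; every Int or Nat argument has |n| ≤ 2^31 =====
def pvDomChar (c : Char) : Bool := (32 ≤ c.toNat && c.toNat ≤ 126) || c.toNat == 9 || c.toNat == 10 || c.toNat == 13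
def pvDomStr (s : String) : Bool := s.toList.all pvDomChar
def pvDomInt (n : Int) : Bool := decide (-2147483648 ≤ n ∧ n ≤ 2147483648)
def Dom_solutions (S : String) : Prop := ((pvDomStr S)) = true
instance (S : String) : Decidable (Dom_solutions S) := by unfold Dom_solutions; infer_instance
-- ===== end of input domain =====

-- B replaces A's single running-max scan with a per-char state machine by: sort the words by
-- length descending, return the length of the first valid one (length odd & digit count odd).

-- ===== PORT A =====
-- checkPass's per-character loop, carrying the two counters (lc, dc)
def checkPassGo : List Char → Int → Int → Bool × Int
  | [], lc, dc =>
    if lc % 2 ≠ 0 ∨ dc % 2 ≠ 1 then (false, lc + dc) else (true, lc + dc)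
  | x :: xs, lc, dc =>
    if ('a' ≤ x ∧ x ≤ 'z') ∨ ('A' ≤ x ∧ x ≤ 'Z') then checkPassGo xs (lc + 1) dc
    else if '0' ≤ x ∧ x ≤ '9' then checkPassGo xs lc (dc + 1)
    else (false, 0)

def checkPass (ws : List Char) : Bool × Int := checkPassGo ws 0 0

def solutions (S : String) : Int :=
  (PySem.Chars.splitOn S.toList [' ']).foldl
    (fun longest ws =>
      let bl := checkPass ws
      if !bl.1 then longest else max longest bl.2)
    (-1)

-- ===== PORT B =====
def bIsDigit (c : Char) : Bool := decide ('0' ≤ c ∧ c ≤ '9')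

def bValid (w : List Char) : Bool :=
  w.all (fun c => decide ('a' ≤ c ∧ c ≤ 'z') || decide ('A' ≤ c ∧ c ≤ 'Z') || bIsDigit c)

def bAccept (w : List Char) : Bool :=
  (w.length % 2 == 1) && bValid w && (w.countP bIsDigit % 2 == 1)

def solutions_alt (S : String) : Int :=
  match (PySem.List.sorted (PySem.Chars.splitOn S.toList [' '])
          (fun w => (w.length : Int)) true).find? bAccept with
  | some w => (w.length : Int)
  | none => -1

-- ===== PRECONDITION & SPEC =====
def Spec_solutions (S : String) (out : Int) : Prop := out = solutions_alt S
instance (S : String) (out : Int) : Decidable (Spec_solutions S out) := by unfold Spec_solutions; infer_instance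

-- ===== CLAIM (what is proved, stated in full; the proofs are below) =====
def Claim_equal_solutions : Prop := ∀ (S : String), Dom_solutions S → Spec_solutions S (solutions S)

-- ===== LEMMAS AND PROOFS =====

def bIsLetter (c : Char) : Bool := decide ('a' ≤ c ∧ c ≤ 'z') || decide ('A' ≤ c ∧ c ≤ 'Z')

theorem letter_not_digit {c : Char} (h : bIsLetter c = true) : bIsDigit c = false := by
  simp only [bIsLetter, Bool.or_eq_true, decide_eq_true_eq] at h
  simp only [bIsDigit, decide_eq_false_iff_not, not_and]
  intro h0 h9
  rcases h with ⟨h1, _⟩ | ⟨h1, _⟩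
  · exact absurd (le_trans h1 h9) (by decide)
  · exact absurd (le_trans h1 h9) (by decide)

theorem bValid_cons (x : Char) (xs : List Char) :
    bValid (x :: xs) = ((bIsLetter x || bIsDigit x) && bValid xs) := by
  simp [bValid, bIsLetter, List.all_cons, Bool.or_assoc]

-- characterisation of A's per-word loop by B's predicates
theorem checkPassGo_eq (cs : List Char) (lc dc : Int) :
    checkPassGo cs lc dc =
      if bValid cs then
        (decide ((lc + (cs.countP bIsLetter : Nat)) % 2 = 0 ∧
                 (dc + (cs.countP bIsDigit : Nat)) % 2 = 1),
         (lc + (cs.countP bIsLetter : Nat)) + (dc + (cs.countP bIsDigit : Nat)))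
      else (false, 0) := by
  induction cs generalizing lc dc with
  | nil =>
    simp only [checkPassGo, bValid, List.all_nil, List.countP_nil, Nat.cast_zero, add_zero, if_true]
    by_cases h : lc % 2 ≠ 0 ∨ dc % 2 ≠ 1
    · rw [if_pos h]
      have hd : ¬ (lc % 2 = 0 ∧ dc % 2 = 1) := by tauto
      rw [decide_eq_false hd]
    · rw [if_neg h]
      rw [not_or, not_not, not_not] at h
      rw [decide_eq_true h]
  | cons x xs ih =>
    by_cases hl : ('a' ≤ x ∧ x ≤ 'z') ∨ ('A' ≤ x ∧ x ≤ 'Z')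
    · have hlb : bIsLetter x = true := by simp [bIsLetter, hl]
      have hdb : bIsDigit x = false := letter_not_digit hlb
      simp only [checkPassGo, if_pos hl, ih, bValid_cons, List.countP_cons, hlb, hdb,
        Bool.true_or, Bool.true_and]
      push_cast
      ring_nf
    · have hlb : bIsLetter x = false := by
        rw [← Bool.not_eq_true]; simp [bIsLetter, hl]
      by_cases hd : '0' ≤ x ∧ x ≤ '9'
      · have hdb : bIsDigit x = true := by simp [bIsDigit, hd]
        simp only [checkPassGo, if_neg hl, if_pos hd, ih, bValid_cons, List.countP_cons,
          hlb, hdb, Bool.false_or, Bool.true_and]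
        push_cast
        ring_nf
      · have hdb : bIsDigit x = false := by
          rw [← Bool.not_eq_true]; simp [bIsDigit, hd]
        simp [checkPassGo, if_neg hl, if_neg hd, bValid_cons, hlb, hdb]

-- on a valid word, length = letters + digits
theorem length_eq_counts {w : List Char} (h : bValid w = true) :
    w.length = w.countP bIsLetter + w.countP bIsDigit := by
  induction w with
  | nil => simp
  | cons x xs ih =>
    rw [bValid_cons, Bool.and_eq_true] at h
    obtain ⟨hx, hxs⟩ := h
    have ih' := ih hxs
    by_cases hL : bIsLetter x = true
    · have hD := letter_not_digit hL
      simp [hL, hD, ih']; omega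
    · have hL' : bIsLetter x = false := by rwa [Bool.not_eq_true] at hL
      have hD : bIsDigit x = true := by
        rw [hL', Bool.false_or] at hx; exact hx
      simp [hL', hD, ih']
      omega

-- A's per-word test, in B's terms
theorem checkPass_fst (w : List Char) : (checkPass w).1 = bAccept w := by
  rw [checkPass, checkPassGo_eq]
  by_cases hv : bValid w = true
  · rw [if_pos hv]
    have hlen := length_eq_counts hv
    simp only [bAccept, hv, Bool.and_true]
    apply Bool.eq_iff_iff.mpr
    simp only [decide_eq_true_eq, Bool.and_eq_true, beq_iff_eq, zero_add]
    omega
  · have hv' : bValid w = false := by rwa [Bool.not_eq_true] at hv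
    rw [if_neg (by simp [hv'])]
    simp [bAccept, hv']

theorem checkPass_snd_of_accept {w : List Char} (h : bAccept w = true) :
    (checkPass w).2 = (w.length : Int) := by
  have hv : bValid w = true := by
    simp only [bAccept, Bool.and_eq_true] at h; exact h.1.2
  rw [checkPass, checkPassGo_eq, if_pos hv]
  have hlen := length_eq_counts hv
  simp only [zero_add]
  omega

-- A's fold step, in B's terms
theorem step_eq (longest : Int) (w : List Char) :
    (let bl := checkPass w; if !bl.1 then longest else max longest bl.2) =
      (if bAccept w then max longest (w.length : Int) else longest) := by
  show (if !(checkPass w).1 then longest else max longest (checkPass w).2) = _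
  rw [checkPass_fst]
  by_cases h : bAccept w = true
  · simp [h, checkPass_snd_of_accept h]
  · have h' : bAccept w = false := by rwa [Bool.not_eq_true] at h
    simp [h']

-- A's whole fold, with B's predicate
theorem solutions_eq_fold (S : String) :
    solutions S =
      (PySem.Chars.splitOn S.toList [' ']).foldl
        (fun longest w => if bAccept w then max longest (w.length : Int) else longest) (-1) := by
  unfold solutions
  apply PySem.List.foldl_congr_mem
  intro acc w _
  exact step_eq acc w

-- a running max never moves once the accumulator dominates the rest
theorem step_foldl_const {t : List (List Char)} {c : Int}
    (h : ∀ w ∈ t, (w.length : Int) ≤ c) :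
    t.foldl (fun longest w => if bAccept w then max longest (w.length : Int) else longest) c = c := by
  induction t with
  | nil => rfl
  | cons a t ih =>
    have ha : (if bAccept a then max c (a.length : Int) else c) = c := by
      by_cases hb : bAccept a = true
      · simp [hb, max_eq_left (h a (by simp))]
      · have hb' : bAccept a = false := by rwa [Bool.not_eq_true] at hb
        simp [hb']
    simp only [List.foldl_cons, ha]
    exact ih fun w hw => h w (by simp [hw])

-- on a length-descending list, the accepted-max fold is the first accepted word's length
theorem fold_desc_eq_find (l : List (List Char))
    (hp : l.Pairwise (fun a b => ((b.length : Int)) ≤ ((a.length : Int)))) :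
    l.foldl (fun longest w => if bAccept w then max longest (w.length : Int) else longest) (-1) =
      (match l.find? bAccept with
       | some w => (w.length : Int)
       | none => -1) := by
  induction l with
  | nil => rfl
  | cons a t ih =>
    rw [List.pairwise_cons] at hp
    obtain ⟨ha, ht⟩ := hp
    by_cases h : bAccept a = true
    · rw [List.find?_cons_of_pos h]
      simp only [List.foldl_cons, h, if_true]
      have h1 : max (-1 : Int) (a.length : Int) = (a.length : Int) := by
        apply max_eq_right; omega
      rw [h1]
      exact step_foldl_const ha
    · have h' : bAccept a = false := by rwa [Bool.not_eq_true] at h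
      rw [List.find?_cons_of_neg (by simp [h'])]
      simp only [List.foldl_cons, h', Bool.false_eq_true, if_false]
      exact ih ht

-- ===== VERDICT (by name: the statement is the Claim_ definition above) =====
theorem solutions_spec : Claim_equal_solutions := by
  intro S _
  unfold Spec_solutions solutions_alt
  rw [solutions_eq_fold]
  have hperm : (PySem.List.sorted (PySem.Chars.splitOn S.toList [' '])
      (fun w => (w.length : Int)) true).Perm (PySem.Chars.splitOn S.toList [' ']) :=
    PySem.List.sorted_perm _ _ _
  rw [← hperm.foldl_eq' (fun x _ y _ z => by
        by_cases hx : bAccept x = true <;> by_cases hy : bAccept y = true <;>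
          simp [hx, hy, max_right_comm] ) (-1)]
  exact fold_desc_eq_find _ (PySem.List.sorted_pairwise_rev _ _)
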